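-- pv_equiv track=rewrite | github.com/ChenSJ98/exercise-codes | Project_gomoku/Archive 2/gomokuAC.py | genStr
-- ===== SOURCE A (Python) =====
-- import copy
--
-- toChar = {
--     1:"a",
--     -1:"b",
--     0:"c"
-- }
--
-- def genStr(cbx):
--     strs = []
--     cb = copy.deepcopy(cbx)
--     verticalStrs = []
--     horizontalStrs = []
--     s1Strs = []# ///
--     s2Strs = []# \\\
--     l = len(cb)
--     for i in range(l):
--         s = ""
--         for j in range(l):
--             s = s + toChar[cb[i][j]]
--         horizontalStrs.append(s)
--     for j in range(l):
--         s = ""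
--         for i in range(l):
--             s = s + toChar[cb[i][j]]
--         verticalStrs.append(s)
--     for i in range(l):
--         s = ""
--         for j in range(l - i):
--             s = s+toChar[cb[i+j][j]]
--         s1Strs.append(s)
--     for j in range(1,l):
--         s = ""
--         for i in range(l - j):
--             s = s + toChar[cb[i][j+i]]
--         s1Strs.append(s)
--     for i in range(l):
--         s = ""
--         for j in range(i + 1):
--             s = s+toChar[cb[i - j][j]]
--         s2Strs.append(s)
--     for j in range(1,l):
--         s = ""
--         for i in range(l - j):
--             s = s + toChar[cb[l-1-i][j + i]]
--         s2Strs.append(s)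
--     strs.append(tuple(verticalStrs))
--     strs.append(tuple(horizontalStrs))
--     strs.append(tuple(s1Strs))
--     strs.append(tuple(s2Strs))
--     return strs
-- ===== SOURCE B (Python) =====
-- import copy
--
-- toChar = {
--     1: "a",
--     -1: "b",
--     0: "c"
-- }
--
-- def _diagBuckets(cbx, l):
--     # one pass over all cells, bucketing the two diagonal families
--     d1 = {}  # /// diagonals, key i-j, chars appended -> increasing-row order
--     d2 = {}  # \\\ diagonals, key i+j, chars prepended -> increasing-column order
--     for i in range(l):
--         for j in range(l):
--             c = toChar[cbx[i][j]]
--             d1[i - j] = d1.get(i - j, "") + c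
--             d2[i + j] = c + d2.get(i + j, "")
--     return d1, d2
--
-- def genStr(cbx):
--     l = len(cbx)
--     horizontalStrs = ["".join(toChar[cbx[i][j]] for j in range(l)) for i in range(l)]
--     verticalStrs = ["".join(toChar[cbx[i][j]] for i in range(l)) for j in range(l)]
--     d1, d2 = _diagBuckets(cbx, l)
--     s1Strs = [d1.get(k, "") for k in list(range(l)) + list(range(-1, -l, -1))]
--     s2Strs = [d2.get(k, "") for k in range(2 * l - 1)]
--     return [tuple(verticalStrs), tuple(horizontalStrs), tuple(s1Strs), tuple(s2Strs)]
-- ===== Notes on version B (the rewrite author's own statement) =====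
-- stated objective: alternative
-- what changed: A extracts each diagonal with its own dedicated nested loop (four separate loop families with hand-crafted index arithmetic); B makes one pass over all cells bucketing characters into two dicts keyed by i-j and i+j (appending for / diagonals, prepending for \ diagonals) and then reads the buckets out in A's emission order, with rows/columns built by comprehension joins.
import Mathlib
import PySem

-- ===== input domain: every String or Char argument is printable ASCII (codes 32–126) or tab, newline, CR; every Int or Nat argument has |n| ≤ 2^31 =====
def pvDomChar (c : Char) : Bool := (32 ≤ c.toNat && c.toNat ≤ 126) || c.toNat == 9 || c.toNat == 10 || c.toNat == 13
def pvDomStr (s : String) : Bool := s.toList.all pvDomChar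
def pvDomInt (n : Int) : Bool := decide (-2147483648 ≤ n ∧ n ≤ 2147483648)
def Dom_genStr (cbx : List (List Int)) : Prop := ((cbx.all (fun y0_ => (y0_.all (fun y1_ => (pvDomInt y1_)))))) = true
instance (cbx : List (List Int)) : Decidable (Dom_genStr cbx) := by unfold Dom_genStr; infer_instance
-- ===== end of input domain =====

-- B replaces A's four hand-indexed diagonal loop families by one pass over all cells bucketing
-- characters into two dicts keyed by i-j / i+j (objective: alternative decomposition, same cost).

-- the module-level dict  toChar = {1:"a", -1:"b", 0:"c"}  (shared by both Pythons)
def toCharDict : PySem.Dict Int String := PySem.Dict.ofList [(1, "a"), (-1, "b"), (0, "c")]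

-- toChar[cbx[i][j]] — total form of the three lookups; Pre_genStr puts every index in range and
-- every board value among the dict keys, exactly where Python returns instead of raising.
def cell (cbx : List (List Int)) (i j : Int) : String :=
  (PySem.Dict.get? toCharDict (PySem.List.pyGetD (PySem.List.pyGetD cbx i []) j 0)).getD ""

-- ===== PORT A =====
def genStr (cbx : List (List Int)) : List (List String) :=
  let strs : List (List String) := []
  let cb := cbx  -- copy.deepcopy(cbx): pure values, identity
  let verticalStrs : List String := []
  let horizontalStrs : List String := []
  let s1Strs : List String := []
  let s2Strs : List String := []
  let l : Int := (cb.length : Int)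
  let horizontalStrs := (PySem.List.pyRange 0 l 1).foldl (fun acc i =>
    let s := (PySem.List.pyRange 0 l 1).foldl (fun s j => s ++ cell cb i j) ""
    acc ++ [s]) horizontalStrs
  let verticalStrs := (PySem.List.pyRange 0 l 1).foldl (fun acc j =>
    let s := (PySem.List.pyRange 0 l 1).foldl (fun s i => s ++ cell cb i j) ""
    acc ++ [s]) verticalStrs
  let s1Strs := (PySem.List.pyRange 0 l 1).foldl (fun acc i =>
    let s := (PySem.List.pyRange 0 (l - i) 1).foldl (fun s j => s ++ cell cb (i + j) j) ""
    acc ++ [s]) s1Strs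
  let s1Strs := (PySem.List.pyRange 1 l 1).foldl (fun acc j =>
    let s := (PySem.List.pyRange 0 (l - j) 1).foldl (fun s i => s ++ cell cb i (j + i)) ""
    acc ++ [s]) s1Strs
  let s2Strs := (PySem.List.pyRange 0 l 1).foldl (fun acc i =>
    let s := (PySem.List.pyRange 0 (i + 1) 1).foldl (fun s j => s ++ cell cb (i - j) j) ""
    acc ++ [s]) s2Strs
  let s2Strs := (PySem.List.pyRange 1 l 1).foldl (fun acc j =>
    let s := (PySem.List.pyRange 0 (l - j) 1).foldl (fun s i => s ++ cell cb (l - 1 - i) (j + i)) ""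
    acc ++ [s]) s2Strs
  let strs := strs ++ [verticalStrs]
  let strs := strs ++ [horizontalStrs]
  let strs := strs ++ [s1Strs]
  let strs := strs ++ [s2Strs]
  strs

-- ===== PORT B =====
-- helper _diagBuckets(cbx, l) of Source B
def diagBuckets (cbx : List (List Int)) (l : Int) :
    PySem.Dict Int String × PySem.Dict Int String :=
  (PySem.List.pyRange 0 l 1).foldl (fun st i =>
    (PySem.List.pyRange 0 l 1).foldl (fun st j =>
      let c := cell cbx i j
      (st.1.insert (i - j) (st.1.getD (i - j) "" ++ c),
       st.2.insert (i + j) (c ++ st.2.getD (i + j) ""))) st)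
    (PySem.Dict.empty, PySem.Dict.empty)

def genStr_alt (cbx : List (List Int)) : List (List String) :=
  let l : Int := (cbx.length : Int)
  let horizontalStrs := (PySem.List.pyRange 0 l 1).map (fun i =>
    PySem.Str.join "" ((PySem.List.pyRange 0 l 1).map (fun j => cell cbx i j)))
  let verticalStrs := (PySem.List.pyRange 0 l 1).map (fun j =>
    PySem.Str.join "" ((PySem.List.pyRange 0 l 1).map (fun i => cell cbx i j)))
  let dd := diagBuckets cbx l
  let s1Strs := (PySem.List.pyRange 0 l 1 ++ PySem.List.pyRange (-1) (-l) (-1)).map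
    (fun k => dd.1.getD k "")
  let s2Strs := (PySem.List.pyRange 0 (2 * l - 1) 1).map (fun k => dd.2.getD k "")
  [verticalStrs, horizontalStrs, s1Strs, s2Strs]

-- ===== PRECONDITION & SPEC =====
-- Pre_: exactly where Python A returns normally — every row has at least len(cbx) entries
-- (else cb[i][j] raises IndexError; only the first len(cbx) columns are ever read) and each
-- entry actually read is a key of toChar, i.e. in {1, -1, 0} (else KeyError).
def Pre_genStr (cbx : List (List Int)) : Prop :=
  ∀ row ∈ cbx, cbx.length ≤ row.length ∧ ∀ v ∈ row.take cbx.length, v = 1 ∨ v = -1 ∨ v = 0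
instance (cbx : List (List Int)) : Decidable (Pre_genStr cbx) := by unfold Pre_genStr; infer_instance

def pvWitness_genStr : List (List Int) := [[1, 0], [-1, 1]]

def Spec_genStr (cbx : List (List Int)) (out : List (List String)) : Prop := out = genStr_alt cbx
instance (cbx : List (List Int)) (out : List (List String)) : Decidable (Spec_genStr cbx out) := by unfold Spec_genStr; infer_instance

-- ===== CLAIM (what is proved, stated in full; the proofs are below) =====
def Claim_equal_genStr : Prop := ∀ (cbx : List (List Int)), Dom_genStr cbx → Pre_genStr cbx → Spec_genStr cbx (genStr cbx)

-- ===== LEMMAS AND PROOFS =====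

-- character of the cell, as a list (all string reasoning is done on .toList)
def cc (cbx : List (List Int)) (i j : Int) : List Char := (cell cbx i j).toList

-- ''.join over lists-of-chars
theorem intercalate_nil (xs : List (List Char)) : ([] : List Char).intercalate xs = xs.flatten := by
  induction xs with
  | nil => rfl
  | cons a t ih =>
    cases t with
    | nil => simp [List.intercalate]
    | cons b u =>
      simp only [List.intercalate] at ih ⊢
      simp [List.intersperse] at ih ⊢
      exact ih

theorem joinNil (parts : List String) :
    (PySem.Str.join "" parts).toList = (parts.map String.toList).flatten := by
  simp [PySem.Str.toList_join, PySem.Chars.join, intercalate_nil]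

theorem foldl_str (f : Int → String) :
    ∀ (xs : List Int) (s0 : String),
      (xs.foldl (fun s j => s ++ f j) s0).toList
        = s0.toList ++ (xs.map (fun j => (f j).toList)).flatten := by
  intro xs
  induction xs with
  | nil => intro s0; simp
  | cons x t ih =>
    intro s0
    simp only [List.foldl_cons, List.map_cons, List.flatten_cons]
    rw [ih, String.toList_append, List.append_assoc]

-- a map that is [] except possibly at one point flattens to that point's value
theorem pick (f : Int → List Char) (t : Int) :
    ∀ (xs : List Int), xs.Nodup →
      (xs.map (fun j => if j = t then f j else ([] : List Char))).flatten
        = if t ∈ xs then f t else [] := by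
  intro xs
  induction xs with
  | nil => intro _; simp
  | cons x u ih =>
    intro hnd
    rcases List.nodup_cons.mp hnd with ⟨hx, hu⟩
    simp only [List.map_cons, List.flatten_cons, ih hu, List.mem_cons]
    by_cases hxt : x = t
    · subst hxt
      simp [hx]
    · simp [hxt, Ne.symm hxt]

theorem inner_spec (cbx : List (List Int)) (i : Int) :
    ∀ (js : List Int) (st : PySem.Dict Int String × PySem.Dict Int String) (k : Int),
      (((js.foldl (fun st j =>
          let c := cell cbx i j
          (st.1.insert (i - j) (st.1.getD (i - j) "" ++ c),
           st.2.insert (i + j) (c ++ st.2.getD (i + j) ""))) st).1.getD k "").toList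
        = ((st.1.getD k "").toList)
            ++ (js.map (fun j => if i - j = k then cc cbx i j else [])).flatten)
      ∧ (((js.foldl (fun st j =>
          let c := cell cbx i j
          (st.1.insert (i - j) (st.1.getD (i - j) "" ++ c),
           st.2.insert (i + j) (c ++ st.2.getD (i + j) ""))) st).2.getD k "").toList
        = (js.reverse.map (fun j => if i + j = k then cc cbx i j else [])).flatten
            ++ ((st.2.getD k "").toList)) := by
  intro js
  induction js with
  | nil => intro st k; simp
  | cons j t ih =>
    intro st k
    simp only [List.foldl_cons]
    refine ⟨?_, ?_⟩
    · rw [(ih _ k).1]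
      show ((st.1.insert (i - j) (st.1.getD (i - j) "" ++ cell cbx i j)).getD k "").toList ++ _ = _
      by_cases hk : i - j = k
      · rw [hk, PySem.Dict.getD_insert_self]
        simp [hk, cc, String.toList_append]
      · rw [PySem.Dict.getD_insert_of_ne _ _ _ (fun h => hk h.symm)]
        simp [hk]
    · rw [(ih _ k).2]
      show _ ++ ((st.2.insert (i + j) (cell cbx i j ++ st.2.getD (i + j) "")).getD k "").toList = _
      simp only [List.reverse_cons, List.map_append, List.flatten_append, List.map_cons,
        List.map_nil, List.flatten_cons, List.flatten_nil, List.append_nil]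
      by_cases hk : i + j = k
      · rw [hk, PySem.Dict.getD_insert_self]
        simp [cc, String.toList_append]
      · rw [PySem.Dict.getD_insert_of_ne _ _ _ (fun h => hk h.symm)]
        simp [hk]

theorem outer_spec (cbx : List (List Int)) (l : Int) :
    ∀ (is : List Int) (st : PySem.Dict Int String × PySem.Dict Int String) (k : Int),
      (((is.foldl (fun st i =>
          (PySem.List.pyRange 0 l 1).foldl (fun st j =>
            let c := cell cbx i j
            (st.1.insert (i - j) (st.1.getD (i - j) "" ++ c),
             st.2.insert (i + j) (c ++ st.2.getD (i + j) ""))) st) st).1.getD k "").toList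
        = ((st.1.getD k "").toList)
            ++ (is.map (fun i =>
                ((PySem.List.pyRange 0 l 1).map
                  (fun j => if i - j = k then cc cbx i j else [])).flatten)).flatten)
      ∧ (((is.foldl (fun st i =>
          (PySem.List.pyRange 0 l 1).foldl (fun st j =>
            let c := cell cbx i j
            (st.1.insert (i - j) (st.1.getD (i - j) "" ++ c),
             st.2.insert (i + j) (c ++ st.2.getD (i + j) ""))) st) st).2.getD k "").toList
        = (is.reverse.map (fun i =>
            ((PySem.List.pyRange 0 l 1).reverse.map
              (fun j => if i + j = k then cc cbx i j else [])).flatten)).flatten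
            ++ ((st.2.getD k "").toList)) := by
  intro is
  induction is with
  | nil => intro st k; simp
  | cons i t ih =>
    intro st k
    simp only [List.foldl_cons]
    refine ⟨?_, ?_⟩
    · rw [(ih _ k).1, (inner_spec cbx i (PySem.List.pyRange 0 l 1) st k).1]
      simp [List.append_assoc]
    · rw [(ih _ k).2, (inner_spec cbx i (PySem.List.pyRange 0 l 1) st k).2]
      simp [List.append_assoc]

theorem d1_getD (cbx : List (List Int)) (l k : Int) :
    (((diagBuckets cbx l).1.getD k "").toList)
      = ((PySem.List.pyRange 0 l 1).map
          (fun i => if 0 ≤ i - k ∧ i - k < l then cc cbx i (i - k) else [])).flatten := by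
  unfold diagBuckets
  rw [(outer_spec cbx l (PySem.List.pyRange 0 l 1) (PySem.Dict.empty, PySem.Dict.empty) k).1]
  rw [show ((PySem.Dict.empty : PySem.Dict Int String).getD k "").toList = [] from rfl]
  rw [List.nil_append]
  apply congrArg List.flatten
  apply List.map_congr_left
  intro i _
  rw [List.map_congr_left (fun j _ => if_congr (show (i - j = k) ↔ (j = i - k) by omega)
        (rfl : cc cbx i j = cc cbx i j) rfl)]
  rw [pick (fun j => cc cbx i j) (i - k) _ (PySem.List.nodup_pyRange_one 0 l)]
  exact if_congr PySem.List.mem_pyRange_one rfl rfl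

theorem d2_getD (cbx : List (List Int)) (l k : Int) :
    (((diagBuckets cbx l).2.getD k "").toList)
      = ((PySem.List.pyRange 0 l 1).reverse.map
          (fun i => if 0 ≤ k - i ∧ k - i < l then cc cbx i (k - i) else [])).flatten := by
  unfold diagBuckets
  rw [(outer_spec cbx l (PySem.List.pyRange 0 l 1) (PySem.Dict.empty, PySem.Dict.empty) k).2]
  rw [show ((PySem.Dict.empty : PySem.Dict Int String).getD k "").toList = [] from rfl]
  rw [List.append_nil]
  apply congrArg List.flatten
  apply List.map_congr_left
  intro i _
  rw [List.map_congr_left (fun j _ => if_congr (show (i + j = k) ↔ (j = k - i) by omega)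
        (rfl : cc cbx i j = cc cbx i j) rfl)]
  rw [pick (fun j => cc cbx i j) (k - i) _ (List.nodup_reverse.mpr (PySem.List.nodup_pyRange_one 0 l))]
  exact if_congr (by rw [List.mem_reverse, PySem.List.mem_pyRange_one]) rfl rfl

theorem s1_elem_pos (cbx : List (List Int)) (l k : Int) (h0 : 0 ≤ k) (hkl : k < l) :
    (PySem.List.pyRange 0 (l - k) 1).foldl (fun s j => s ++ cell cbx (k + j) j) ""
      = (diagBuckets cbx l).1.getD k "" := by
  apply String.toList_inj.mp
  rw [foldl_str, d1_getD]
  rw [show ("" : String).toList = [] from rfl, List.nil_append]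
  rw [PySem.List.pyRange_one_append 0 k l h0 (le_of_lt hkl)]
  rw [List.map_append, List.flatten_append]
  rw [List.map_congr_left (fun i hi =>
        if_neg (fun hc => by rw [PySem.List.mem_pyRange_one] at hi; omega)
          : ∀ i ∈ PySem.List.pyRange 0 k 1,
              (if 0 ≤ i - k ∧ i - k < l then cc cbx i (i - k) else []) = ([] : List Char))]
  rw [show ((PySem.List.pyRange 0 k 1).map (fun _ => ([] : List Char))).flatten = [] from by
        simp, List.nil_append]
  rw [List.map_congr_left (fun i hi =>
        if_pos (by rw [PySem.List.mem_pyRange_one] at hi; omega)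
          : ∀ i ∈ PySem.List.pyRange k l 1,
              (if 0 ≤ i - k ∧ i - k < l then cc cbx i (i - k) else []) = cc cbx i (i - k))]
  rw [PySem.List.pyRange_one 0 (l - k), PySem.List.pyRange_one k l]
  rw [show ((l : ℤ) - k - 0) = l - k from by ring]
  simp only [List.map_map]
  apply congrArg List.flatten
  apply List.map_congr_left
  intro m _
  simp [cc, add_sub_cancel_left]

theorem s1_elem_neg (cbx : List (List Int)) (l j0 : Int) (h1 : 1 ≤ j0) (hjl : j0 < l) :
    (PySem.List.pyRange 0 (l - j0) 1).foldl (fun s i => s ++ cell cbx i (j0 + i)) ""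
      = (diagBuckets cbx l).1.getD (-j0) "" := by
  apply String.toList_inj.mp
  rw [foldl_str, d1_getD]
  rw [show ("" : String).toList = [] from rfl, List.nil_append]
  rw [PySem.List.pyRange_one_append 0 (l - j0) l (by omega) (by omega)]
  rw [List.map_append, List.flatten_append]
  rw [List.map_congr_left (fun i hi =>
        if_neg (fun hc => by rw [PySem.List.mem_pyRange_one] at hi; omega)
          : ∀ i ∈ PySem.List.pyRange (l - j0) l 1,
              (if 0 ≤ i - -j0 ∧ i - -j0 < l then cc cbx i (i - -j0) else []) = ([] : List Char))]
  rw [show ((PySem.List.pyRange (l - j0) l 1).map (fun _ => ([] : List Char))).flatten = []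
        from by simp, List.append_nil]
  rw [List.map_congr_left (fun i hi =>
        if_pos (by rw [PySem.List.mem_pyRange_one] at hi; omega)
          : ∀ i ∈ PySem.List.pyRange 0 (l - j0) 1,
              (if 0 ≤ i - -j0 ∧ i - -j0 < l then cc cbx i (i - -j0) else []) = cc cbx i (i - -j0))]
  apply congrArg List.flatten
  apply List.map_congr_left
  intro i _
  have e : i - -j0 = j0 + i := by ring
  simp [cc, e]

theorem s2_elem_pos (cbx : List (List Int)) (l k : Int) (h0 : 0 ≤ k) (hkl : k < l) :
    (PySem.List.pyRange 0 (k + 1) 1).foldl (fun s j => s ++ cell cbx (k - j) j) ""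
      = (diagBuckets cbx l).2.getD k "" := by
  apply String.toList_inj.mp
  rw [foldl_str, d2_getD]
  rw [show ("" : String).toList = [] from rfl, List.nil_append]
  rw [PySem.List.pyRange_one_append 0 (k + 1) l (by omega) (by omega)]
  rw [List.reverse_append, List.map_append, List.flatten_append]
  rw [List.map_congr_left (fun i hi =>
        if_neg (fun hc => by rw [List.mem_reverse, PySem.List.mem_pyRange_one] at hi; omega)
          : ∀ i ∈ (PySem.List.pyRange (k + 1) l 1).reverse,
              (if 0 ≤ k - i ∧ k - i < l then cc cbx i (k - i) else []) = ([] : List Char))]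
  rw [show (((PySem.List.pyRange (k + 1) l 1).reverse).map (fun _ => ([] : List Char))).flatten = []
        from by simp, List.nil_append]
  rw [List.map_congr_left (fun i hi =>
        if_pos (by rw [List.mem_reverse, PySem.List.mem_pyRange_one] at hi; omega)
          : ∀ i ∈ (PySem.List.pyRange 0 (k + 1) 1).reverse,
              (if 0 ≤ k - i ∧ k - i < l then cc cbx i (k - i) else []) = cc cbx i (k - i))]
  rw [show (PySem.List.pyRange 0 (k + 1) : List Int) = PySem.List.pyRange (-1 + 1) (k + 1)
        from by norm_num]
  rw [← PySem.List.pyRange_neg_one_eq_reverse k (-1)]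
  rw [PySem.List.pyRange_neg_one k (-1), PySem.List.pyRange_one (-1 + 1) (k + 1)]
  rw [show (k - (-1) : ℤ) = k + 1 - (-1 + 1) from by ring]
  simp only [List.map_map]
  apply congrArg List.flatten
  apply List.map_congr_left
  intro t _
  simp [cc, sub_sub_cancel]

theorem s2_elem_neg (cbx : List (List Int)) (l j0 : Int) (h1 : 1 ≤ j0) (hjl : j0 < l) :
    (PySem.List.pyRange 0 (l - j0) 1).foldl (fun s i => s ++ cell cbx (l - 1 - i) (j0 + i)) ""
      = (diagBuckets cbx l).2.getD (l - 1 + j0) "" := by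
  apply String.toList_inj.mp
  rw [foldl_str, d2_getD]
  rw [show ("" : String).toList = [] from rfl, List.nil_append]
  rw [PySem.List.pyRange_one_append 0 j0 l (by omega) (by omega)]
  rw [List.reverse_append, List.map_append, List.flatten_append]
  rw [List.map_congr_left (fun i hi =>
        if_neg (fun hc => by rw [List.mem_reverse, PySem.List.mem_pyRange_one] at hi; omega)
          : ∀ i ∈ (PySem.List.pyRange 0 j0 1).reverse,
              (if 0 ≤ l - 1 + j0 - i ∧ l - 1 + j0 - i < l then cc cbx i (l - 1 + j0 - i) else [])
                = ([] : List Char))]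
  rw [show (((PySem.List.pyRange 0 j0 1).reverse).map (fun _ => ([] : List Char))).flatten = []
        from by simp, List.append_nil]
  rw [List.map_congr_left (fun i hi =>
        if_pos (by rw [List.mem_reverse, PySem.List.mem_pyRange_one] at hi; omega)
          : ∀ i ∈ (PySem.List.pyRange j0 l 1).reverse,
              (if 0 ≤ l - 1 + j0 - i ∧ l - 1 + j0 - i < l then cc cbx i (l - 1 + j0 - i) else [])
                = cc cbx i (l - 1 + j0 - i))]
  rw [show (PySem.List.pyRange j0 l : List Int) = PySem.List.pyRange (j0 - 1 + 1) (l - 1 + 1)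
        from by norm_num]
  rw [← PySem.List.pyRange_neg_one_eq_reverse (l - 1) (j0 - 1)]
  rw [PySem.List.pyRange_neg_one (l - 1) (j0 - 1), PySem.List.pyRange_one 0 (l - j0)]
  rw [show (l - 1 - (j0 - 1) : ℤ) = l - j0 - 0 from by ring]
  simp only [List.map_map]
  apply congrArg List.flatten
  apply List.map_congr_left
  intro t _
  have e : l - 1 + j0 - (l - 1 - (t : Int)) = j0 + (t : Int) := by ring
  simp [cc, e]

theorem main_eq (cbx : List (List Int)) : genStr cbx = genStr_alt cbx := by
  by_cases hl0 : ((cbx.length : Int)) ≤ 0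
  · have h0 : cbx = [] := by
      cases cbx with
      | nil => rfl
      | cons r t => exfalso; simp at hl0; omega
    subst h0; rfl
  · have hl : 0 < ((cbx.length : Int)) := by omega
    simp only [genStr, genStr_alt, PySem.List.foldl_append_singleton_eq_map, List.nil_append,
      List.cons_append]
    refine congr_arg₂ _ ?_ (congr_arg₂ _ ?_ (congr_arg₂ _ ?_ (congr_arg₂ _ ?_ rfl)))
    · -- vertical
      apply List.map_congr_left
      intro j _
      apply String.toList_inj.mp
      rw [foldl_str, joinNil]
      simp [List.map_map, Function.comp_def]
    · -- horizontal
      apply List.map_congr_left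
      intro i _
      apply String.toList_inj.mp
      rw [foldl_str, joinNil]
      simp [List.map_map, Function.comp_def]
    · -- s1
      rw [List.map_append]
      refine congr_arg₂ _ ?_ ?_
      · apply List.map_congr_left
        intro i hi
        rw [PySem.List.mem_pyRange_one] at hi
        exact s1_elem_pos cbx _ i hi.1 hi.2
      · rw [PySem.List.pyRange_one 1 ((cbx.length : Int)),
            PySem.List.pyRange_neg_one (-1) (-((cbx.length : Int)))]
        rw [show ((-1 : ℤ) - -((cbx.length : Int))) = (cbx.length : Int) - 1 from by ring]
        simp only [List.map_map]
        apply List.map_congr_left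
        intro t ht
        rw [List.mem_range] at ht
        simp only [Function.comp_apply]
        have h2 : (1 : ℤ) + (t : Int) < (cbx.length : Int) := by omega
        rw [show ((-1 : ℤ) - (t : Int)) = -(1 + (t : Int)) from by ring]
        exact s1_elem_neg cbx _ (1 + (t : Int)) (by omega) h2
    · -- s2
      rw [PySem.List.pyRange_one_append 0 ((cbx.length : Int)) (2 * (cbx.length : Int) - 1)
            (by omega) (by omega), List.map_append]
      refine congr_arg₂ _ ?_ ?_
      · apply List.map_congr_left
        intro i hi
        rw [PySem.List.mem_pyRange_one] at hi
        exact s2_elem_pos cbx _ i hi.1 hi.2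
      · rw [PySem.List.pyRange_one 1 ((cbx.length : Int)),
            PySem.List.pyRange_one ((cbx.length : Int)) (2 * (cbx.length : Int) - 1)]
        rw [show (2 * ((cbx.length : Int)) - 1 - (cbx.length : Int)) = (cbx.length : Int) - 1
              from by ring]
        simp only [List.map_map]
        apply List.map_congr_left
        intro t ht
        rw [List.mem_range] at ht
        simp only [Function.comp_apply]
        have h2 : (1 : ℤ) + (t : Int) < (cbx.length : Int) := by omega
        rw [show ((cbx.length : Int) + (t : Int)) = (cbx.length : Int) - 1 + (1 + (t : Int))
              from by ring]
        exact s2_elem_neg cbx _ (1 + (t : Int)) (by omega) h2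

-- ===== VERDICT (by name: the statement is the Claim_ definition above) =====
theorem genStr_spec : Claim_equal_genStr := by
  intro cbx _ _
  unfold Spec_genStr
  exact main_eq cbx
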